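-- pv_equiv track=rewrite | github.com/tmdekd/Python_Algorithm | programmers_공 던지기.py | solution
-- ===== SOURCE A (Python) =====
-- def solution(numbers, k):
--     n = len(numbers)
--     idx = 0      # 시작은 0번 인덱스 (1번 사람)
--     cnt = 1      # 첫 번째 던짐은 이미 시작에서 2칸 이동한 사람
--
--     while cnt < k:
--         idx = (idx + 2) % n  # 두 칸씩 이동 (원형이므로 % n)
--         cnt += 1
--
--     return numbers[idx]
-- ===== SOURCE B (Python) =====
-- def solution(numbers, k):
--     # closed form: after the initial throw, each of the remaining max(k-1,0)
--     # throws advances two seats around the circle of len(numbers) people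
--     return numbers[(2 * max(k - 1, 0)) % len(numbers)]
-- ===== Notes on version B (the rewrite author's own statement) =====
-- stated objective: simpler
-- what changed: Replaced the k-iteration simulation loop by the closed-form index (2*max(k-1,0)) % len(numbers).
import Mathlib
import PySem

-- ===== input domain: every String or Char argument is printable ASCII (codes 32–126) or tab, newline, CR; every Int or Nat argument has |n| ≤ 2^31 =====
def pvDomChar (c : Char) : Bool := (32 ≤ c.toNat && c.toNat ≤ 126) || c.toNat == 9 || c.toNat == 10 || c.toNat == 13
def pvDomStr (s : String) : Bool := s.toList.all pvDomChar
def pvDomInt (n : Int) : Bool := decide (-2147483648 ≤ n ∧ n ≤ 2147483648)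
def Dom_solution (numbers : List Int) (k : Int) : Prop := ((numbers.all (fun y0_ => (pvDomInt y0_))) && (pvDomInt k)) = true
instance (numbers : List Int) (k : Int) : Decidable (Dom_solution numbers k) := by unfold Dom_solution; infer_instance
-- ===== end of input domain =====

-- B replaces A's simulation loop by the closed-form index (2*max(k-1,0)) % n (simpler).

-- ===== PORT A =====
-- the 'while cnt < k' loop, with the same state (idx, cnt)
def solutionLoop (n idx cnt k : Int) : Int :=
  if cnt < k then solutionLoop n (PySem.Int.mod (idx + 2) n) (cnt + 1) k else idx
termination_by (k - cnt).toNat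
decreasing_by omega

-- numbers[idx]: under Pre_ the index is always in range, so pyGetD is exact
def solution (numbers : List Int) (k : Int) : Int :=
  PySem.List.pyGetD numbers (solutionLoop (numbers.length : Int) 0 1 k) 0

-- ===== PORT B =====
def solution_alt (numbers : List Int) (k : Int) : Int :=
  PySem.List.pyGetD numbers (PySem.Int.mod (2 * max (k - 1) 0) (numbers.length : Int)) 0

-- ===== PRECONDITION & SPEC =====
-- A raises on the empty list (ZeroDivisionError for k > 1, IndexError otherwise)
def Pre_solution (numbers : List Int) (k : Int) : Prop := numbers ≠ []
instance (numbers : List Int) (k : Int) : Decidable (Pre_solution numbers k) := by unfold Pre_solution; infer_instance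
def pvWitness_solution : List Int × Int := ([3, 1, 4], 5)

def Spec_solution (numbers : List Int) (k : Int) (out : Int) : Prop := out = solution_alt numbers k
instance (numbers : List Int) (k : Int) (out : Int) : Decidable (Spec_solution numbers k out) := by unfold Spec_solution; infer_instance

-- ===== CLAIM (what is proved, stated in full; the proofs are below) =====
def Claim_equal_solution : Prop := ∀ (numbers : List Int) (k : Int), Dom_solution numbers k → Pre_solution numbers k → Spec_solution numbers k (solution numbers k)

-- ===== LEMMAS AND PROOFS =====

-- loop invariant: starting from a reduced index, the loop computes (idx + 2*(remaining throws)) mod n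
theorem solutionLoop_eq (n : Int) (hn : 0 < n) :
    ∀ (fuel : Nat) (idx cnt k : Int), (k - cnt).toNat = fuel → 0 ≤ idx → idx < n →
      solutionLoop n idx cnt k = (idx + 2 * max (k - cnt) 0) % n := by
  intro fuel
  induction fuel with
  | zero =>
    intro idx cnt k hf h0 h1
    have hlt : ¬ cnt < k := by omega
    rw [solutionLoop, if_neg hlt]
    have : max (k - cnt) 0 = 0 := by omega
    rw [this]
    simp [Int.emod_eq_of_lt h0 h1]
  | succ m ih =>
    intro idx cnt k hf h0 h1
    have hlt : cnt < k := by omega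
    rw [solutionLoop, if_pos hlt]
    have hmod : PySem.Int.mod (idx + 2) n = (idx + 2) % n :=
      PySem.Int.mod_eq_emod_of_pos hn
    rw [hmod]
    have h0' : 0 ≤ (idx + 2) % n := Int.emod_nonneg _ (by omega)
    have h1' : (idx + 2) % n < n := Int.emod_lt_of_pos _ hn
    rw [ih ((idx + 2) % n) (cnt + 1) k (by omega) h0' h1']
    rw [Int.emod_add_emod]
    have : idx + 2 + 2 * max (k - (cnt + 1)) 0 = idx + 2 * max (k - cnt) 0 := by omega
    rw [this]

-- ===== VERDICT (by name: the statement is the Claim_ definition above) =====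
theorem solution_spec : Claim_equal_solution := by
  intro numbers k _ hpre
  unfold Spec_solution solution solution_alt
  have hn : 0 < (numbers.length : Int) := by
    have : numbers.length ≠ 0 := fun h => hpre (List.eq_nil_of_length_eq_zero h)
    omega
  rw [solutionLoop_eq _ hn ((k - 1).toNat) 0 1 k rfl le_rfl hn,
      PySem.Int.mod_eq_emod_of_pos hn]
  norm_num
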